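-- pv_equiv track=rewrite | github.com/sfa119f/tucil1-kriptografi | autoVigenereCipher.py | autoCipher
-- ===== SOURCE A (Python) =====
-- def makePlain(PlainText):
-- # Mengubah plaintext sesuai dengan format huruf kapital dan membuang angka, spasi, dan tanda baca
--     p = []
--     plainText = PlainText.upper()
--     plain = list(plainText) # Memecah kata menjadi huruf-huruf
--     for char in plain:
--         if (char.isalpha()):
--             p.append(char)
--         newP = "".join(p) # Menggabungkan huruf menjadi kata
--     return newP
--
-- def makeKeyAuto(plainText, key):
-- # Mengubah key sesuai dengan format huruf besar dan menambah plainText ke belakang key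
-- # hingga panjang key = plainText
--     key = key.upper()
--     key = list(key) # Memecah kata menjadi huruf-huruf
--     if (len(plainText) < len(key)):
--         for i in range (len(plainText)):
--             k = key[i]
--             key.append(k)
--             newKey = "".join(key)
--         return newKey
--     elif (len(plainText) > len(key)):
--         for i in range (len(plainText)-len(key)):
--             k = plainText[i%len(plainText)] # Membuat perulangan key sepanjang plainText
--             key.append(k)
--             newKey = "".join(key) # Menggabungkan huruf menjadi kata
--         return newKey
--     else:
--         return key
--
-- def autoCipher(plainText, key):
-- # Melakukan enkripsi plainText menjadi cipherText
-- # Formula : c[j] = E(p[j])  = (p[j] + k[i]) mod 26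
--     p = makePlain(plainText)
--     k = makeKeyAuto(p,key)
--     cipher = []
--     for i in range (len(p)):
--         n = ((ord(p[i]) + ord(k[i])) % 26) + ord('A') # konversi ke angka
--         cipher.append(chr(n)) # konversi ke alfabet
--         cip = "".join(cipher) # Menggabungkan huruf menjadi kata
--     return cip
-- ===== SOURCE B (Python) =====
-- def autoCipher(plainText, key):
--     # One streaming pass: filter and encrypt each letter as it arrives, consuming
--     # the autokey stream (the key, then the letters themselves) via an index pointer.
--     stream = list(key.upper())
--     out = []
--     i = 0
--     for ch in plainText.upper():
--         if ch.isalpha():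
--             stream.append(ch)
--             out.append(chr((ord(ch) + ord(stream[i])) % 26 + 65))
--             i += 1
--     return "".join(out)
-- ===== Notes on version B (the rewrite author's own statement) =====
-- stated objective: faster
-- what changed: B is one streaming pass that filters and encrypts each letter as it arrives, appending the letter to the keystream buffer it consumes by an index pointer, instead of A's three staged passes (filter with join-per-iteration, branch-and-append keystream construction with join-per-iteration, then an indexed encryption loop with join-per-iteration).
-- crash fix: A raises UnboundLocalError whenever the plaintext contains no alphabetic character (newP/newKey/cip are never assigned); B returns the empty string there. — e.g. on autoCipher("123!", "Key"): A raises UnboundLocalError, B returns ""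
import Mathlib
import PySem

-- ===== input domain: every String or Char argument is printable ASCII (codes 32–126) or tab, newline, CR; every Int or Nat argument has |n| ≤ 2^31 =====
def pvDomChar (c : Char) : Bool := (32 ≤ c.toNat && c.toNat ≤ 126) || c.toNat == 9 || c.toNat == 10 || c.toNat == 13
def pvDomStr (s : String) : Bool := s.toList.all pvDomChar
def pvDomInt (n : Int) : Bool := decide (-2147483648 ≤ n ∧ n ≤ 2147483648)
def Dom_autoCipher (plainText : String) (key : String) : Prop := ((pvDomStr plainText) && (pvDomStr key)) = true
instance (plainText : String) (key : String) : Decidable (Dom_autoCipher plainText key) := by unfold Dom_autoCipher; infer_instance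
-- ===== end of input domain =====

-- B replaces A's three staged passes (filter, build keystream by branch-and-append, encrypt by index)
-- by ONE streaming pass that filters and encrypts each letter as it arrives, feeding the letter into
-- the keystream buffer it consumes by a pointer; same values wherever A returns (objective: faster).

-- ===== PORT A =====
-- makePlain: for char in list(PlainText.upper()): if char.isalpha(): p.append(char); return "".join(p)
-- (when the loop body never runs, Python's newP is unbound and A raises — those inputs are outside Pre_;
--  the port just returns the joined accumulator)
def makePlainA (s : String) : List Char :=
  ((PySem.Str.upper s).toList).foldl
    (fun p c => if PySem.Chars.isalpha c then p ++ [c] else p) []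

-- makeKeyAuto: key = list(key.upper()); three-way comparison of len(plainText) with len(key),
-- each branch appending one char per loop iteration (key[i] resp. plainText[i % len(plainText)]).
-- (the newKey-unbound case, reachable only with an empty filtered plaintext, is outside Pre_;
--  every index is in range on the admitted inputs, so getD's default never fires)
def makeKeyAutoA (p : List Char) (key : String) : List Char :=
  let k := (PySem.Str.upper key).toList
  if p.length < k.length then
    (List.range p.length).foldl (fun acc i => acc ++ [acc.getD i 'A']) k
  else if p.length > k.length then
    (List.range (p.length - k.length)).foldl (fun acc i => acc ++ [p.getD (i % p.length) 'A']) k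
  else k

-- autoCipher: for i in range(len(p)): cipher.append(chr((ord(p[i]) + ord(k[i])) % 26 + ord('A')))
-- (the cip-unbound case, len(p) = 0, is outside Pre_; all indices are in range, getD defaults never fire)
def autoCipher (plainText : String) (key : String) : String :=
  let p := makePlainA plainText
  let k := makeKeyAutoA p key
  String.ofList ((List.range p.length).foldl
    (fun acc i => acc ++ [Char.ofNat (((p.getD i 'A').toNat + (k.getD i 'A').toNat) % 26 + 65)]) [])

-- ===== PORT B =====
-- one fold over the upper-cased input; state = (stream, out, i): stream = list(key.upper()) extended by
-- each consumed letter, out the emitted cipher letters, i the keystream pointer (stream[i] is always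
-- in range — the current letter was just appended — so getD's default never fires)
def autoCipher_alt (plainText : String) (key : String) : String :=
  String.ofList
    ((((PySem.Str.upper plainText).toList).foldl
      (fun (s : List Char × List Char × Nat) ch =>
        if PySem.Chars.isalpha ch then
          (s.1 ++ [ch],
           s.2.1 ++ [Char.ofNat ((ch.toNat + ((s.1 ++ [ch]).getD s.2.2 'A').toNat) % 26 + 65)],
           s.2.2 + 1)
        else s)
      ((PySem.Str.upper key).toList, [], 0)).2.1)

-- ===== PRECONDITION & SPEC =====
-- Pre_ excludes exactly the inputs where the Python A raises UnboundLocalError: plaintexts with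
-- no alphabetic character (the filtered plaintext is empty, so newP/newKey/cip are never assigned).
def Pre_autoCipher (plainText : String) (key : String) : Prop :=
  plainText.toList.any PySem.Chars.isalpha = true
instance (plainText : String) (key : String) : Decidable (Pre_autoCipher plainText key) := by
  unfold Pre_autoCipher; infer_instance
def pvWitness_autoCipher : String × String := ("HELLO", "KEY")

-- A raises UnboundLocalError whenever the plaintext contains no alphabetic character; B returns "".
def Raises_autoCipher (plainText : String) (key : String) : Prop :=
  plainText.toList.all (fun c => !PySem.Chars.isalpha c) = true
instance (plainText : String) (key : String) : Decidable (Raises_autoCipher plainText key) := by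
  unfold Raises_autoCipher; infer_instance
def pvRaiseWitness_autoCipher : String × String := ("123!", "Key")
def pvRaiseWitnessOut_autoCipher : String := ""

def Spec_autoCipher (plainText : String) (key : String) (out : String) : Prop :=
  out = autoCipher_alt plainText key
instance (plainText : String) (key : String) (out : String) : Decidable (Spec_autoCipher plainText key out) := by
  unfold Spec_autoCipher; infer_instance

-- ===== CLAIM (what is proved, stated in full; the proofs are below) =====
def Claim_equal_autoCipher : Prop := ∀ (plainText : String) (key : String), Dom_autoCipher plainText key → Pre_autoCipher plainText key → Spec_autoCipher plainText key (autoCipher plainText key)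
def Claim_raises_autoCipher : Prop := (∀ (plainText : String) (key : String), Dom_autoCipher plainText key → Raises_autoCipher plainText key → ¬ Pre_autoCipher plainText key) ∧ (Dom_autoCipher (pvRaiseWitness_autoCipher.1) (pvRaiseWitness_autoCipher.2) ∧ Raises_autoCipher (pvRaiseWitness_autoCipher.1) (pvRaiseWitness_autoCipher.2) ∧ autoCipher_alt (pvRaiseWitness_autoCipher.1) (pvRaiseWitness_autoCipher.2) = pvRaiseWitnessOut_autoCipher)

-- ===== LEMMAS AND PROOFS =====

-- the encryption of one letter (shared closed form both ports compute per position)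
def encChar (a b : Char) : Char := Char.ofNat ((a.toNat + b.toNat) % 26 + 65)

-- the cipher text as a function of the filtered plaintext q and the raw keystream prefix K:
-- position i pairs q[i] with (K ++ q)[i]
def Mmap (K q : List Char) : List Char :=
  (List.range q.length).map (fun i => encChar (q.getD i 'A') ((K ++ q).getD i 'A'))

-- Mmap is built one letter at a time: appending a letter appends one cipher character
theorem Mmap_snoc (K p : List Char) (x : Char) :
    Mmap K (p ++ [x]) = Mmap K p ++ [encChar x ((K ++ (p ++ [x])).getD p.length 'A')] := by
  unfold Mmap
  rw [List.length_append, List.length_singleton, List.range_succ, List.map_append,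
      List.map_singleton]
  congr 1
  · apply List.map_congr_left
    intro i hi
    have hi' : i < p.length := List.mem_range.mp hi
    rw [List.getD_append _ _ _ _ hi', ← List.append_assoc,
        List.getD_append _ _ _ _ (by rw [List.length_append]; omega)]
  · have hx : (p ++ [x]).getD p.length 'A' = x := by
      rw [List.getD_append_right _ _ _ _ (le_refl _)]
      simp
    rw [hx]

-- loop invariant of B's single pass: starting from stream = K ++ p, out = Mmap K p, pointer = |p|,
-- processing l extends p by l's alphabetic letters
theorem alt_loop (K : List Char) : ∀ (l p : List Char),
    l.foldl
      (fun (s : List Char × List Char × Nat) ch =>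
        if PySem.Chars.isalpha ch then
          (s.1 ++ [ch],
           s.2.1 ++ [Char.ofNat ((ch.toNat + ((s.1 ++ [ch]).getD s.2.2 'A').toNat) % 26 + 65)],
           s.2.2 + 1)
        else s)
      (K ++ p, Mmap K p, p.length)
    = (K ++ (p ++ l.filter PySem.Chars.isalpha),
       Mmap K (p ++ l.filter PySem.Chars.isalpha),
       (p ++ l.filter PySem.Chars.isalpha).length) := by
  intro l
  induction l with
  | nil => intro p; simp
  | cons x xs ih =>
    intro p
    simp only [List.foldl_cons, List.filter_cons]
    split_ifs with hx
    · rw [List.append_assoc K p [x],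
          show Char.ofNat ((x.toNat + ((K ++ (p ++ [x])).getD p.length 'A').toNat) % 26 + 65)
             = encChar x ((K ++ (p ++ [x])).getD p.length 'A') from rfl,
          ← Mmap_snoc,
          show p.length + 1 = (p ++ [x]).length from by simp,
          ih (p ++ [x])]
      simp [List.append_assoc]
    · exact ih p

-- B's port equals the closed form Mmap over the filtered plaintext
theorem alt_eq_Mmap (plainText key : String) :
    autoCipher_alt plainText key
      = String.ofList (Mmap (PySem.Str.upper key).toList
          (((PySem.Str.upper plainText).toList).filter PySem.Chars.isalpha)) := by
  have hM : Mmap ((PySem.Str.upper key).toList) [] = [] := by simp [Mmap]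
  have h0 := alt_loop ((PySem.Str.upper key).toList) ((PySem.Str.upper plainText).toList) []
  simp only [List.nil_append, List.append_nil, List.length_nil] at h0
  rw [hM] at h0
  unfold autoCipher_alt
  rw [h0]

-- a foldl that only ever appends to its accumulator keeps the accumulator as a prefix
theorem foldl_append_keeps_prefix {α β : Type} (f : List α → β → α) :
    ∀ (l : List β) (acc : List α), ∃ t, l.foldl (fun a i => a ++ [f a i]) acc = acc ++ t := by
  intro l
  induction l with
  | nil => intro acc; exact ⟨[], by simp⟩
  | cons x xs ih =>
    intro acc
    obtain ⟨t, ht⟩ := ih (acc ++ [f acc x])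
    exact ⟨f acc x :: t, by simpa using ht⟩

-- the key list A builds agrees with the closed-form keystream (key.upper() ++ p) on every index < len p
theorem makeKeyAutoA_getD (p : List Char) (key : String) (i : Nat) (hi : i < p.length) (d : Char) :
    (makeKeyAutoA p key).getD i d = ((PySem.Str.upper key).toList ++ p).getD i d := by
  unfold makeKeyAutoA
  set k := (PySem.Str.upper key).toList with hk
  by_cases h1 : p.length < k.length
  · simp only [h1, if_true]
    obtain ⟨t, ht⟩ := foldl_append_keeps_prefix (fun (acc : List Char) (j : Nat) => acc.getD j 'A')
      (List.range p.length) k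
    rw [ht, List.getD_append _ _ _ _ (by omega), List.getD_append _ _ _ _ (by omega)]
  · by_cases h2 : p.length > k.length
    · simp only [h1, if_false, h2, if_true]
      rw [PySem.List.foldl_append_singleton_eq_map]
      by_cases h3 : i < k.length
      · rw [List.getD_append _ _ _ _ h3, List.getD_append _ _ _ _ h3]
      · have hlen : ((List.range (p.length - k.length)).map
            (fun j => p.getD (j % p.length) 'A')).length = p.length - k.length := by simp
        rw [List.getD_append_right _ _ _ _ (by omega), List.getD_append_right _ _ _ _ (by omega)]
        have hj : i - k.length < p.length - k.length := by omega
        rw [List.getD_eq_getElem _ _ (by simpa [hlen] using hj)]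
        simp only [List.getElem_map, List.getElem_range]
        have : (i - k.length) % p.length = i - k.length := Nat.mod_eq_of_lt (by omega)
        rw [this, List.getD_eq_getElem _ _ (by omega), List.getD_eq_getElem _ _ (by omega)]
    · have hlen : p.length = k.length := by omega
      simp only [h1, if_false, h2, if_false]
      rw [List.getD_append _ _ _ _ (by omega)]

-- the two ports compute the same character list (no precondition needed for the ports themselves)
theorem autoCipher_eq_alt (plainText key : String) :
    autoCipher plainText key = autoCipher_alt plainText key := by
  unfold autoCipher
  have hp : makePlainA plainText = ((PySem.Str.upper plainText).toList).filter PySem.Chars.isalpha := by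
    unfold makePlainA
    exact PySem.List.foldl_append_if_eq_filter _ _ []
  rw [hp, alt_eq_Mmap]
  set P := ((PySem.Str.upper plainText).toList).filter PySem.Chars.isalpha with hP
  refine congrArg String.ofList ?_
  rw [PySem.List.foldl_append_singleton_eq_map, List.nil_append]
  unfold Mmap
  apply List.map_congr_left
  intro i hi
  have hi' : i < P.length := List.mem_range.mp hi
  rw [makeKeyAutoA_getD P key i hi']
  rfl

-- ===== VERDICT (by name: the statement is the Claim_ definition above) =====
theorem autoCipher_spec : Claim_equal_autoCipher := by
  intro plainText key _ _
  unfold Spec_autoCipher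
  exact autoCipher_eq_alt plainText key

theorem autoCipher_raises : Claim_raises_autoCipher := by
  unfold Claim_raises_autoCipher
  refine ⟨?_, by decide⟩
  intro plainText key _ hR hP
  unfold Pre_autoCipher at hP
  unfold Raises_autoCipher at hR
  simp only [List.any_eq_true] at hP
  simp only [List.all_eq_true] at hR
  obtain ⟨c, hc, hca⟩ := hP
  have := hR c hc
  simp [hca] at this

-- self-check of the raise witness: B's port really returns "" at the input where Python A raises
theorem autoCipher_raises_witness :
    autoCipher_alt (pvRaiseWitness_autoCipher.1) (pvRaiseWitness_autoCipher.2) = pvRaiseWitnessOut_autoCipher :=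
  autoCipher_raises.2.2.2
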